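-- pv_equiv track=rewrite | github.com/MartinKStoykov/SoftUni-Courses | SoftUni-Python-Fundamentals/p04_functions/more_exercises/multiplication_sign.py | multiplication_result
-- ===== SOURCE A (Python) =====
-- def multiplication_result(n1, n2, n3):
--
--
--     if n1 == 0 or n2 == 0 or n3 == 0:
--         return "zero"
--     elif n1 > 0 and n2 > 0 and n3 > 0:
--         return "positive"
--     else:
--         negatives = [num for num in (n1, n2, n3) if num < 0]
--         if len(negatives) == 2:
--             return "positive"
--         else:
--             return "negative"
-- ===== SOURCE B (Python) =====
-- def multiplication_result(n1, n2, n3):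
--     neg = False
--     for n in (n1, n2, n3):
--         if n == 0:
--             return "zero"
--         if n < 0:
--             neg = not neg
--     return "negative" if neg else "positive"
-- ===== Notes on version B (the rewrite author's own statement) =====
-- stated objective: simpler
-- what changed: Replaces the zero-guard + all-positive elif + negatives-list-length branching by a single pass with early zero-exit that toggles a parity flag per negative value.
import Mathlib
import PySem

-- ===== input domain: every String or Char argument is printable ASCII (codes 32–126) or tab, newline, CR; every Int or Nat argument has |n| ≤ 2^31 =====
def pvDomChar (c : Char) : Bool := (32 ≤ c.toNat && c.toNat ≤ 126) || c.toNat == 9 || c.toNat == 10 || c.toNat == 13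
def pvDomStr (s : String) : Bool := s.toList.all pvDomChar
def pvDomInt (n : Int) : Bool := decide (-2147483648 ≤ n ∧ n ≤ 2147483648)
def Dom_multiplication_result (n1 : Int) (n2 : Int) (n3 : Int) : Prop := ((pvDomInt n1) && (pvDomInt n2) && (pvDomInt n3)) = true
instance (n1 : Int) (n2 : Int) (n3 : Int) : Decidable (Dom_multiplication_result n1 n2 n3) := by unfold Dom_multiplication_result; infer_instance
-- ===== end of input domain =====

-- B replaces A's zero-guard + all-positive elif + negatives-count branching by a single
-- pass with early zero-exit toggling a parity flag per negative value (objective: simpler).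

-- ===== PORT A =====
def multiplication_result (n1 : Int) (n2 : Int) (n3 : Int) : String :=
  if n1 = 0 ∨ n2 = 0 ∨ n3 = 0 then "zero"
  else if n1 > 0 ∧ n2 > 0 ∧ n3 > 0 then "positive"
  else
    let negatives := [n1, n2, n3].filter (fun num => num < 0)
    if negatives.length = 2 then "positive" else "negative"

-- ===== PORT B =====
-- the loop over (n1, n2, n3) with early return, as structural recursion on the list
def mrAltGo : List Int → Bool → String
  | [], neg => if neg then "negative" else "positive"
  | n :: rest, neg =>
    if n = 0 then "zero"
    else if n < 0 then mrAltGo rest (!neg)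
    else mrAltGo rest neg

def multiplication_result_alt (n1 : Int) (n2 : Int) (n3 : Int) : String :=
  mrAltGo [n1, n2, n3] false

-- ===== PRECONDITION & SPEC =====
def Spec_multiplication_result (n1 : Int) (n2 : Int) (n3 : Int) (out : String) : Prop := out = multiplication_result_alt n1 n2 n3
instance (n1 : Int) (n2 : Int) (n3 : Int) (out : String) : Decidable (Spec_multiplication_result n1 n2 n3 out) := by unfold Spec_multiplication_result; infer_instance

-- ===== CLAIM (what is proved, stated in full; the proofs are below) =====
def Claim_equal_multiplication_result : Prop := ∀ (n1 : Int) (n2 : Int) (n3 : Int), Dom_multiplication_result n1 n2 n3 → Spec_multiplication_result n1 n2 n3 (multiplication_result n1 n2 n3)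

-- ===== LEMMAS AND PROOFS =====

-- ===== VERDICT (by name: the statement is the Claim_ definition above) =====
theorem multiplication_result_spec : Claim_equal_multiplication_result := by
  intro n1 n2 n3 _
  unfold Spec_multiplication_result multiplication_result multiplication_result_alt
  by_cases h1 : n1 = 0
  · simp [mrAltGo, h1]
  by_cases h2 : n2 = 0
  · simp [mrAltGo, h1, h2]
  by_cases h3 : n3 = 0
  · simp [mrAltGo, h1, h2, h3]
  have q1 : (0 < n1) ↔ ¬ (n1 < 0) := by omega
  have q2 : (0 < n2) ↔ ¬ (n2 < 0) := by omega
  have q3 : (0 < n3) ↔ ¬ (n3 < 0) := by omega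
  by_cases g1 : n1 < 0 <;> by_cases g2 : n2 < 0 <;> by_cases g3 : n3 < 0 <;>
    simp [mrAltGo, List.filter_nil, h1, h2, h3, g1, g2, g3, q1, q2, q3]
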